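-- pv_equiv track=rewrite | github.com/rehosting/penguin | crawl_utils.py | _strip_url
-- ===== SOURCE A (Python) =====
-- def _strip_url(url):
--     '''
--     Remove any redundant properties from URLs
--
--     Remove duplicate /s and anything after #
--
--     Also remove anything after ? - TODO: get params might be part of form attack surface we want to fuzz
--     so maybe we should add these to the fuzz queue
--     '''
--
--     if "://" in url:
--         meth, body = url.split("://")
--     else:
--         meth = None
--         body = url
--
--     while "//" in body:
--         body = body.replace("//", "/")
--
--     if "#" in body:
--         body = body.split("#")[0]
--
--     if "?" in body:
--         # TODO: maybe add to fuzz queue as a GET target?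
--         body = body.split("?")[0]
--
--     if body.startswith("/"):
--         body = body[1:]
--
--     if meth:
--         return meth + "://" + body
--     return body
-- ===== SOURCE B (Python) =====
-- def _strip_url(url):
--     i = url.find("://")
--     if i == -1:
--         meth, body = None, url
--     else:
--         meth, body = url[:i], url[i + 3:]
--     out = []
--     for ch in body:
--         if ch in "#?":
--             break
--         if ch != "/" or not out or out[-1] != "/":
--             out.append(ch)
--     res = "".join(out)
--     if res.startswith("/"):
--         res = res[1:]
--     if meth:
--         return meth + "://" + res
--     return res
-- ===== Notes on version B (the rewrite author's own statement) =====
-- stated objective: faster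
-- what changed: Replaces the repeated replace('//','/') while-loop plus two split passes with a single left-to-right scan over the body that stops at the first '#'/'?' and skips a '/' that follows an emitted '/', and replaces the unpacking split('://') with find-and-slice; Pre_ excludes urls with two or more '://', on which A's unpacking raises ValueError.
import Mathlib
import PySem

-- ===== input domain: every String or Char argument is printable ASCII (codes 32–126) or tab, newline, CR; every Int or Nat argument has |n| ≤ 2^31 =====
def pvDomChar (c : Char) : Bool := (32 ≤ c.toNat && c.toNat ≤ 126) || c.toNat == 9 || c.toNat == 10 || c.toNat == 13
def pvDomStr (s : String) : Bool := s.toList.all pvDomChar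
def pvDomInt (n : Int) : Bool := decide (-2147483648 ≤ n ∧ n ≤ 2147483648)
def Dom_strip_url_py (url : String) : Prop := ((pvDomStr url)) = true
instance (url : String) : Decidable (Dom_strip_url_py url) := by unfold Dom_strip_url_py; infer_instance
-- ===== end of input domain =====

-- B replaces A's repeated replace("//","/") loop plus two split passes by one left-to-right scan,
-- and the unpacking split("://") by find-and-slice; return values proved equal on Pre_.

-- ===== PORT A =====
-- while "//" in body: body = body.replace("//", "/")  — fuel = body.length iterations always
-- suffice (each firing replace shortens body: pvRep_length_lt below), so this is A's loop made total by fuel.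
def stripACollapse : Nat → List Char → List Char
  | 0, body => body
  | fuel+1, body =>
    if PySem.Chars.isIn ['/', '/'] body then
      stripACollapse fuel (PySem.Chars.replace body ['/', '/'] ['/'])
    else body

def strip_url_py (url : String) : String :=
  let u := url.toList
  let mb : Option (List Char) × List Char :=
    if PySem.Chars.isIn [':', '/', '/'] u then
      match PySem.Chars.splitOn u [':', '/', '/'] with
      | [m, b] => (some m, b)
      | _ => (none, [])      -- 2-variable unpacking fails here: ValueError, excluded by Pre_
    else (none, u)
  let body0 := stripACollapse mb.2.length mb.2
  -- body.split("#")[0] — the [0] always exists (split never returns [])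
  let body1 := if PySem.Chars.isIn ['#'] body0 then (PySem.Chars.splitOn body0 ['#']).headD [] else body0
  let body2 := if PySem.Chars.isIn ['?'] body1 then (PySem.Chars.splitOn body1 ['?']).headD [] else body1
  let body3 := if PySem.Chars.startswith body2 ['/'] then body2.drop 1 else body2  -- body[1:], exact for index 1 ≥ 0
  match mb.1 with
  | some m => if m.isEmpty then String.ofList body3 else String.ofList (m ++ [':', '/', '/'] ++ body3)
  | none => String.ofList body3

-- ===== PORT B =====
-- the for-loop of Source B with its break ('ch in "#?"') and conditional append; out[-1] is pyGet? out (-1)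
def stripBScan : List Char → List Char → List Char
  | [], out => out
  | c :: rest, out =>
    if c = '#' ∨ c = '?' then out
    else if c ≠ '/' ∨ out = [] ∨ PySem.List.pyGet? out (-1) ≠ some '/' then
      stripBScan rest (out ++ [c])
    else stripBScan rest out

def strip_url_py_alt (url : String) : String :=
  let u := url.toList
  let i := PySem.Chars.find u [':', '/', '/']
  let mb : Option (List Char) × List Char :=
    if i = -1 then (none, u)
    else (some (u.take i.toNat), u.drop (i.toNat + 3))   -- url[:i], url[i+3:] with 0 ≤ i ≤ len(u): take/drop exact
  let res0 := stripBScan mb.2 []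
  let res1 := if PySem.Chars.startswith res0 ['/'] then res0.drop 1 else res0
  match mb.1 with
  | some m => if m.isEmpty then String.ofList res1 else String.ofList (m ++ [':', '/', '/'] ++ res1)
  | none => String.ofList res1

-- ===== PRECONDITION & SPEC =====
-- Pre_ excludes exactly the urls containing "://" twice or more, on which A's
-- 'meth, body = url.split("://")' raises ValueError (too many values to unpack).
def Pre_strip_url_py (url : String) : Prop := PySem.Str.count url "://" ≤ 1
instance (url : String) : Decidable (Pre_strip_url_py url) := by unfold Pre_strip_url_py; infer_instance
def pvWitness_strip_url_py : String := "http://a//b/#frag"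

def Spec_strip_url_py (url : String) (out : String) : Prop := out = strip_url_py_alt url
instance (url : String) (out : String) : Decidable (Spec_strip_url_py url out) := by unfold Spec_strip_url_py; infer_instance

-- ===== CLAIM (what is proved, stated in full; the proofs are below) =====
def Claim_equal_strip_url_py : Prop := ∀ (url : String), Dom_strip_url_py url → Pre_strip_url_py url → Spec_strip_url_py url (strip_url_py url)

-- ===== LEMMAS AND PROOFS =====

-- what one pass of body.replace("//", "/") computes
def pvRep : List Char → List Char
  | [] => []
  | [a] => [a]
  | a :: b :: t => if a = '/' ∧ b = '/' then '/' :: pvRep t else a :: pvRep (b :: t)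

-- slash-run collapse: the fixpoint of pvRep
def pvSqz : List Char → List Char
  | [] => []
  | [a] => [a]
  | a :: b :: t => if a = '/' ∧ b = '/' then pvSqz (b :: t) else a :: pvSqz (b :: t)

-- B's scan expressed with only the previous emitted character as state
def pvSqA : Option Char → List Char → List Char
  | _, [] => []
  | prev, c :: t =>
    if c = '#' ∨ c = '?' then []
    else if c = '/' ∧ prev = some '/' then pvSqA prev t
    else c :: pvSqA (some c) t

def pvP : Char → Bool := fun c => c != '#' && c != '?'

-- step equations of the PySem fuel loops
lemma go_rep_zero (l acc : List Char) :
    PySem.Chars.replace.go ['/','/'] ['/'] 0 l acc = acc.reverse ++ l := rfl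
lemma go_rep_nil (fuel : Nat) (acc : List Char) :
    PySem.Chars.replace.go ['/','/'] ['/'] (fuel+1) [] acc = acc.reverse := rfl
lemma go_rep_cons (fuel : Nat) (a : Char) (t acc : List Char) :
    PySem.Chars.replace.go ['/','/'] ['/'] (fuel+1) (a::t) acc =
      if ['/','/'].isPrefixOf (a::t) then PySem.Chars.replace.go ['/','/'] ['/'] fuel (t.drop 1) ('/'::acc)
      else PySem.Chars.replace.go ['/','/'] ['/'] fuel t (a::acc) := rfl

lemma go_split_zero (sep : List Char) (l cur : List Char) (accs : List (List Char)) :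
    PySem.Chars.splitOn.go sep 0 l cur accs = ((cur.reverse ++ l) :: accs).reverse := rfl
lemma go_split_nil (sep : List Char) (fuel : Nat) (cur : List Char) (accs : List (List Char)) :
    PySem.Chars.splitOn.go sep (fuel+1) [] cur accs = (cur.reverse :: accs).reverse := rfl
lemma go_split_cons (sep : List Char) (fuel : Nat) (a : Char) (t cur : List Char) (accs : List (List Char)) :
    PySem.Chars.splitOn.go sep (fuel+1) (a::t) cur accs =
      if sep.isPrefixOf (a::t) then PySem.Chars.splitOn.go sep fuel ((a::t).drop sep.length) [] (cur.reverse :: accs)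
      else PySem.Chars.splitOn.go sep fuel t (a::cur) accs := rfl

lemma go_cnt_zero (sep : List Char) (l : List Char) (acc : Nat) :
    PySem.Chars.count.go sep 0 l acc = acc := by cases l <;> rfl
lemma go_cnt_nil (sep : List Char) (fuel : Nat) (acc : Nat) :
    PySem.Chars.count.go sep fuel [] acc = acc := by cases fuel <;> rfl
lemma go_cnt_cons (sep : List Char) (fuel : Nat) (a : Char) (t : List Char) (acc : Nat) :
    PySem.Chars.count.go sep (fuel+1) (a::t) acc =
      if sep.isPrefixOf (a::t) then PySem.Chars.count.go sep fuel ((a::t).drop sep.length) (acc+1)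
      else PySem.Chars.count.go sep fuel t acc := rfl

lemma prefix_ss_iff (a b : Char) (t : List Char) :
    ['/','/'] <+: (a :: b :: t) ↔ (a = '/' ∧ b = '/') := by
  simp [List.cons_prefix_cons, eq_comm]

lemma isPrefixOf_ss (a b : Char) (t : List Char) :
    (['/','/'].isPrefixOf (a :: b :: t)) = true ↔ (a = '/' ∧ b = '/') := by
  rw [List.isPrefixOf_iff_prefix, prefix_ss_iff]

lemma not_ss_nil : ¬ ['/','/'] <:+: ([] : List Char) := by
  intro h; have := h.length_le; simp at this

lemma not_ss_single (a : Char) : ¬ ['/','/'] <:+: [a] := by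
  intro h; have := h.length_le; simp at this

lemma infix_ss_cons (a b : Char) (t : List Char) :
    ['/', '/'] <:+: (a :: b :: t) ↔ (a = '/' ∧ b = '/') ∨ ['/', '/'] <:+: (b :: t) := by
  rw [List.infix_cons_iff, prefix_ss_iff]

lemma replace_go_eq (fuel : Nat) : ∀ l acc : List Char, l.length ≤ fuel →
    PySem.Chars.replace.go ['/','/'] ['/'] fuel l acc = acc.reverse ++ pvRep l := by
  induction fuel with
  | zero =>
    intro l acc h
    have hl : l = [] := List.eq_nil_of_length_eq_zero (Nat.le_zero.mp h)
    subst hl; simp [go_rep_zero, pvRep]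
  | succ fuel ih =>
    intro l acc h
    match l with
    | [] => simp [go_rep_nil, pvRep]
    | [a] =>
      rw [go_rep_cons]
      have hpre : (['/','/'].isPrefixOf [a]) = false := by simp [List.isPrefixOf]
      rw [hpre, if_neg (by simp)]
      rw [ih [] (a::acc) (by simp)]
      simp [pvRep]
    | a :: b :: t =>
      rw [go_rep_cons]
      by_cases hab : a = '/' ∧ b = '/'
      · rw [if_pos ((isPrefixOf_ss a b t).mpr hab)]
        rw [show (b::t).drop 1 = t from rfl]
        rw [ih t ('/'::acc) (by simp at h; omega)]
        obtain ⟨ha, hb⟩ := hab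
        subst ha; subst hb
        simp [pvRep]
      · rw [if_neg (fun hx => hab ((isPrefixOf_ss a b t).mp hx))]
        rw [ih (b::t) (a::acc) (by simp at h ⊢; omega)]
        simp [pvRep, if_neg hab]

lemma replace_eq_pvRep (l : List Char) :
    PySem.Chars.replace l ['/', '/'] ['/'] = pvRep l := by
  have := replace_go_eq l.length l [] (le_refl _)
  simpa [PySem.Chars.replace] using this

lemma pvRep_length_le : ∀ l : List Char, (pvRep l).length ≤ l.length
  | [] => by simp [pvRep]
  | [a] => by simp [pvRep]
  | a :: b :: t => by
    by_cases hab : a = '/' ∧ b = '/'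
    · simp only [pvRep, if_pos hab, List.length_cons]
      have := pvRep_length_le t; omega
    · simp only [pvRep, if_neg hab, List.length_cons]
      have := pvRep_length_le (b :: t); simp at this; omega

lemma pvRep_length_lt : ∀ l : List Char, ['/', '/'] <:+: l → (pvRep l).length < l.length
  | [], h => absurd h not_ss_nil
  | [a], h => absurd h (not_ss_single a)
  | a :: b :: t, h => by
    by_cases hab : a = '/' ∧ b = '/'
    · simp only [pvRep, if_pos hab, List.length_cons]
      have := pvRep_length_le t; omega
    · have hbt : ['/','/'] <:+: (b :: t) := by
        rcases (infix_ss_cons a b t).mp h with h' | h'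
        · exact absurd h' hab
        · exact h'
      simp only [pvRep, if_neg hab, List.length_cons]
      have := pvRep_length_lt (b :: t) hbt; simp at this ⊢; omega

lemma pvSqz_cons_pvRep (n : Nat) : ∀ t : List Char, ∀ c : Char, t.length ≤ n →
    pvSqz (c :: pvRep t) = pvSqz (c :: t) := by
  induction n with
  | zero =>
    intro t c h
    have ht : t = [] := List.eq_nil_of_length_eq_zero (Nat.le_zero.mp h)
    subst ht; simp [pvRep]
  | succ n ih =>
    intro t c h
    match t with
    | [] => simp [pvRep]
    | [b] => simp [pvRep]
    | b :: d :: r =>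
      by_cases hbd : b = '/' ∧ d = '/'
      · obtain ⟨hb, hd⟩ := hbd; subst hb; subst hd
        rw [show pvRep ('/'::'/'::r) = '/' :: pvRep r from by simp [pvRep]]
        by_cases hc : c = '/'
        · subst hc
          rw [show pvSqz ('/'::'/'::pvRep r) = pvSqz ('/'::pvRep r) from by simp [pvSqz]]
          rw [ih r '/' (by simp at h; omega)]
          simp [pvSqz]
        · rw [show pvSqz (c::'/'::pvRep r) = c :: pvSqz ('/'::pvRep r) from by
            simp [pvSqz, hc]]
          rw [ih r '/' (by simp at h; omega)]
          simp [pvSqz, hc]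
      · rw [show pvRep (b::d::r) = b :: pvRep (d::r) from by simp [pvRep, hbd]]
        by_cases hcb : c = '/' ∧ b = '/'
        · rw [show pvSqz (c::b::pvRep (d::r)) = pvSqz (b::pvRep (d::r)) from by simp [pvSqz, hcb]]
          rw [ih (d::r) b (by simp at h ⊢; omega)]
          simp [pvSqz, hcb]
        · rw [show pvSqz (c::b::pvRep (d::r)) = c :: pvSqz (b::pvRep (d::r)) from by simp [pvSqz, hcb]]
          rw [ih (d::r) b (by simp at h ⊢; omega)]
          simp [pvSqz, hcb]

lemma pvSqz_pvRep : ∀ l : List Char, pvSqz (pvRep l) = pvSqz l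
  | [] => by simp [pvRep]
  | [a] => by simp [pvRep]
  | a :: b :: t => by
    by_cases hab : a = '/' ∧ b = '/'
    · obtain ⟨ha, hb⟩ := hab; subst ha; subst hb
      rw [show pvRep ('/'::'/'::t) = '/' :: pvRep t from by simp [pvRep]]
      rw [pvSqz_cons_pvRep t.length t '/' (le_refl _)]
      simp [pvSqz]
    · rw [show pvRep (a::b::t) = a :: pvRep (b::t) from by simp [pvRep, hab]]
      rw [pvSqz_cons_pvRep (b::t).length (b::t) a (le_refl _)]

lemma pvSqz_no_dup : ∀ l : List Char, ¬ ['/', '/'] <:+: l → pvSqz l = l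
  | [], _ => by simp [pvSqz]
  | [a], _ => by simp [pvSqz]
  | a :: b :: t, h => by
    have hab : ¬ (a = '/' ∧ b = '/') := fun hx => h ((infix_ss_cons a b t).mpr (Or.inl hx))
    have hbt : ¬ ['/','/'] <:+: (b :: t) := fun hx => h ((infix_ss_cons a b t).mpr (Or.inr hx))
    rw [show pvSqz (a::b::t) = a :: pvSqz (b::t) from by simp [pvSqz, hab]]
    rw [pvSqz_no_dup (b::t) hbt]

lemma pvCollapse_eq (fuel : Nat) : ∀ l : List Char, l.length ≤ fuel → stripACollapse fuel l = pvSqz l := by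
  induction fuel with
  | zero =>
    intro l h
    have hl : l = [] := List.eq_nil_of_length_eq_zero (Nat.le_zero.mp h)
    subst hl; simp [stripACollapse, pvSqz]
  | succ fuel ih =>
    intro l h
    rw [stripACollapse]
    by_cases hin : PySem.Chars.isIn ['/','/'] l
    · rw [if_pos hin, replace_eq_pvRep]
      have hinf : ['/','/'] <:+: l := (PySem.Chars.isIn_iff_infix _ _).mp hin
      rw [ih (pvRep l) (by have := pvRep_length_lt l hinf; omega)]
      exact pvSqz_pvRep l
    · rw [if_neg hin]
      exact (pvSqz_no_dup l (fun hx => hin ((PySem.Chars.isIn_iff_infix _ _).mpr hx))).symm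

lemma isPrefixOf_singleton (c a : Char) (t : List Char) :
    ([c].isPrefixOf (a :: t)) = (c == a) := by
  simp [List.isPrefixOf]

lemma splitOn_go_head (c : Char) : ∀ fuel : Nat, ∀ l cur : List Char, ∀ accs : List (List Char),
    l.length + 1 ≤ fuel →
    ∃ rest, PySem.Chars.splitOn.go [c] fuel l cur accs =
      accs.reverse ++ (cur.reverse ++ l.takeWhile (· != c)) :: rest := by
  intro fuel
  induction fuel with
  | zero => intro l cur accs h; omega
  | succ fuel ih =>
    intro l cur accs h
    match l with
    | [] =>
      exact ⟨[], by simp [go_split_nil]⟩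
    | a :: t =>
      rw [go_split_cons, isPrefixOf_singleton]
      by_cases hac : c = a
      · rw [if_pos (by simp [hac])]
        obtain ⟨rest, hr⟩ := ih t [] (cur.reverse :: accs) (by simp at h ⊢; omega)
        refine ⟨t.takeWhile (· != c) :: rest, ?_⟩
        rw [show List.drop [c].length (a :: t) = t from rfl, hr]
        have hae : (a != c) = false := by simp [hac]
        simp [List.takeWhile_cons, hae]
      · rw [if_neg (by simpa using hac)]
        obtain ⟨rest, hr⟩ := ih t (a :: cur) accs (by simp at h ⊢; omega)
        refine ⟨rest, ?_⟩
        rw [hr]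
        have hne : (a != c) = true := by simp; exact fun hx => hac hx.symm
        simp [List.takeWhile_cons, hne]

lemma headD_splitOn_singleton (l : List Char) (c : Char) :
    (PySem.Chars.splitOn l [c]).headD [] = l.takeWhile (· != c) := by
  unfold PySem.Chars.splitOn
  obtain ⟨rest, hr⟩ := splitOn_go_head c (l.length + 1) l [] [] (le_refl _)
  rw [hr]; simp

lemma takeWhile_of_not_mem (l : List Char) (c : Char) (h : c ∉ l) :
    l.takeWhile (· != c) = l := by
  rw [List.takeWhile_eq_self_iff]
  intro x hx
  simp
  exact fun hxc => h (hxc ▸ hx)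

lemma singleton_infix_iff (c : Char) (l : List Char) : [c] <:+: l ↔ c ∈ l := by
  constructor
  · rintro ⟨s, t, rfl⟩; simp
  · intro h
    obtain ⟨s, t, rfl⟩ := List.append_of_mem h
    exact ⟨s, t, by simp⟩

lemma pvP_slash : pvP '/' = true := by decide

lemma pvSqz_takeWhile (n : Nat) : ∀ l : List Char, l.length ≤ n →
    (pvSqz l).takeWhile pvP = pvSqz (l.takeWhile pvP) := by
  induction n with
  | zero =>
    intro l h
    have hl : l = [] := List.eq_nil_of_length_eq_zero (Nat.le_zero.mp h)
    subst hl; simp [pvSqz]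
  | succ n ih =>
    intro l h
    match l with
    | [] => simp [pvSqz]
    | [a] =>
      by_cases hpa : pvP a = true
      · simp [pvSqz, List.takeWhile_cons, hpa]
      · simp at hpa; simp [pvSqz, List.takeWhile_cons, hpa]
    | a :: b :: t =>
      by_cases hab : a = '/' ∧ b = '/'
      · obtain ⟨ha, hb⟩ := hab; subst ha; subst hb
        rw [show pvSqz ('/'::'/'::t) = pvSqz ('/'::t) from by simp [pvSqz]]
        rw [ih ('/'::t) (by simp at h ⊢; omega)]
        rw [show ('/'::'/'::t).takeWhile pvP = '/'::'/'::t.takeWhile pvP from by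
          simp [List.takeWhile_cons, pvP_slash]]
        rw [show ('/'::t).takeWhile pvP = '/'::t.takeWhile pvP from by
          simp [List.takeWhile_cons, pvP_slash]]
        rw [show pvSqz ('/'::'/'::t.takeWhile pvP) = pvSqz ('/'::t.takeWhile pvP) from by simp [pvSqz]]
      · rw [show pvSqz (a::b::t) = a :: pvSqz (b::t) from by simp [pvSqz, hab]]
        by_cases hpa : pvP a = true
        · rw [show (a::b::t).takeWhile pvP = a :: (b::t).takeWhile pvP from by
            simp [List.takeWhile_cons, hpa]]
          rw [List.takeWhile_cons, if_pos hpa]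
          rw [ih (b::t) (by simp at h ⊢; omega)]
          by_cases hpb : pvP b = true
          · rw [show (b::t).takeWhile pvP = b :: t.takeWhile pvP from by
              simp [List.takeWhile_cons, hpb]]
            rw [show pvSqz (a::b::t.takeWhile pvP) = a :: pvSqz (b::t.takeWhile pvP) from by
              simp [pvSqz, hab]]
          · have hb0 : (b::t).takeWhile pvP = [] := by
              simp at hpb; simp [List.takeWhile_cons, hpb]
            rw [hb0]; simp [pvSqz]
        · simp at hpa
          rw [show (a::b::t).takeWhile pvP = [] from by simp [List.takeWhile_cons, hpa]]
          rw [List.takeWhile_cons, if_neg (by simp [hpa])]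
          simp [pvSqz]

lemma pyGet?_neg_one (out : List Char) : PySem.List.pyGet? out (-1) = out.getLast? := by
  cases out with
  | nil => rfl
  | cons x xs =>
    simp only [PySem.List.pyGet?, PySem.List.pyIdx?]
    rw [if_neg (by omega)]
    rw [if_pos (by simp)]
    rw [show ((-(-1 : Int)).toNat) = 1 from rfl, List.getLast?_eq_getElem?]
    simp

lemma stripBScan_eq : ∀ l : List Char, ∀ out : List Char,
    stripBScan l out = out ++ pvSqA out.getLast? l
  | [], out => by simp [stripBScan, pvSqA]
  | c :: rest, out => by
    rw [stripBScan]
    by_cases hbr : c = '#' ∨ c = '?'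
    · rw [if_pos hbr, show pvSqA out.getLast? (c::rest) = [] from by simp [pvSqA, hbr]]
      simp
    · rw [if_neg hbr]
      by_cases happ : c ≠ '/' ∨ out = [] ∨ PySem.List.pyGet? out (-1) ≠ some '/'
      · rw [if_pos happ]
        rw [stripBScan_eq rest (out ++ [c])]
        have hlast : (out ++ [c]).getLast? = some c := by simp
        rw [hlast]
        have hskip : ¬ (c = '/' ∧ out.getLast? = some '/') := by
          rcases happ with h' | h' | h'
          · exact fun hx => h' hx.1
          · subst h'; simp
          · rw [pyGet?_neg_one] at h'; exact fun hx => h' hx.2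
        rw [show pvSqA out.getLast? (c::rest) = c :: pvSqA (some c) rest from by
          simp [pvSqA, hbr, hskip]]
        simp
      · rw [if_neg happ]
        have hc : c = '/' := by by_contra hx; exact happ (Or.inl hx)
        have hlast : PySem.List.pyGet? out (-1) = some '/' := by
          by_contra hx; exact happ (Or.inr (Or.inr hx))
        rw [pyGet?_neg_one] at hlast
        rw [stripBScan_eq rest out, hlast]
        rw [show pvSqA (some '/') (c::rest) = pvSqA (some '/') rest from by
          simp [pvSqA, hbr, hc]]

lemma pvSqA_spec (n : Nat) : ∀ l : List Char, l.length ≤ n →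
    (∀ prev, prev ≠ some '/' → pvSqA prev l = pvSqz (l.takeWhile pvP)) ∧
    ('/' :: pvSqA (some '/') l = pvSqz ('/' :: l.takeWhile pvP)) := by
  induction n with
  | zero =>
    intro l h
    have hl : l = [] := List.eq_nil_of_length_eq_zero (Nat.le_zero.mp h)
    subst hl
    exact ⟨fun prev _ => by simp [pvSqA, pvSqz], by simp [pvSqA, pvSqz]⟩
  | succ n ih =>
    intro l h
    match l with
    | [] => exact ⟨fun prev _ => by simp [pvSqA, pvSqz], by simp [pvSqA, pvSqz]⟩
    | c :: t =>
      have hih := ih t (by simp at h; omega)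
      by_cases hbr : c = '#' ∨ c = '?'
      · have hpc : pvP c = false := by
          rcases hbr with h' | h' <;> subst h' <;> decide
        have htw : (c::t).takeWhile pvP = [] := by simp [List.takeWhile_cons, hpc]
        refine ⟨fun prev _ => ?_, ?_⟩
        · rw [show pvSqA prev (c::t) = [] from by simp [pvSqA, hbr], htw]; simp [pvSqz]
        · rw [show pvSqA (some '/') (c::t) = [] from by simp [pvSqA, hbr], htw]; simp [pvSqz]
      · have hpc : pvP c = true := by
          simp [pvP]
          push_neg at hbr
          exact ⟨hbr.1, hbr.2⟩
        have htw : (c::t).takeWhile pvP = c :: t.takeWhile pvP := by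
          simp [List.takeWhile_cons, hpc]
        constructor
        · intro prev hprev
          have hskip : ¬ (c = '/' ∧ prev = some '/') := fun hx => hprev hx.2
          rw [show pvSqA prev (c::t) = c :: pvSqA (some c) t from by simp [pvSqA, hbr, hskip]]
          rw [htw]
          by_cases hc : c = '/'
          · subst hc
            rw [hih.2]
          · rw [hih.1 (some c) (by simp [hc])]
            cases htt : t.takeWhile pvP with
            | nil => simp [pvSqz]
            | cons d r =>
              rw [show pvSqz (c::d::r) = c :: pvSqz (d::r) from by
                simp only [pvSqz]
                rw [if_neg (fun hx => hc hx.1)]]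
        · by_cases hc : c = '/'
          · subst hc
            rw [show pvSqA (some '/') ('/'::t) = pvSqA (some '/') t from by simp [pvSqA, hbr]]
            rw [htw]
            rw [show pvSqz ('/'::'/'::t.takeWhile pvP) = pvSqz ('/'::t.takeWhile pvP) from by
              simp [pvSqz]]
            exact hih.2
          · rw [show pvSqA (some '/') (c::t) = c :: pvSqA (some c) t from by
              simp only [pvSqA]
              rw [if_neg hbr, if_neg (fun hx => hc hx.1)]]
            rw [htw]
            rw [show pvSqz ('/'::c::t.takeWhile pvP) = '/' :: pvSqz (c::t.takeWhile pvP) from by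
              simp only [pvSqz]
              rw [if_neg (fun hx => hc hx.2)]]
            rw [hih.1 (some c) (by simp [hc])]
            cases htt : t.takeWhile pvP with
            | nil => simp [pvSqz]
            | cons d r =>
              rw [show pvSqz (c::d::r) = c :: pvSqz (d::r) from by
                simp only [pvSqz]
                rw [if_neg (fun hx => hc hx.1)]]

lemma splitOn_go_no_occ (sep : List Char) (hs : sep ≠ []) : ∀ l : List Char, ∀ fuel : Nat,
    ∀ cur : List Char, ∀ accs : List (List Char), ¬ sep <:+: l →
    PySem.Chars.splitOn.go sep fuel l cur accs = accs.reverse ++ [cur.reverse ++ l]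
  | [], fuel, cur, accs, _ => by
    cases fuel with
    | zero => simp [go_split_zero]
    | succ fuel => simp [go_split_nil]
  | a :: t, fuel, cur, accs, h => by
    cases fuel with
    | zero => simp [go_split_zero]
    | succ fuel =>
      rw [go_split_cons]
      have hpre : (sep.isPrefixOf (a::t)) = false := by
        rw [Bool.eq_false_iff]
        intro hx
        exact h (List.IsPrefix.isInfix (List.isPrefixOf_iff_prefix.mp hx))
      rw [hpre, if_neg (by simp)]
      have ht : ¬ sep <:+: t := fun hx => h (List.infix_cons_iff.mpr (Or.inr hx))
      rw [splitOn_go_no_occ sep hs t fuel (a::cur) accs ht]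
      simp

lemma splitOn_go_one (sep : List Char) (hs : sep ≠ []) : ∀ l : List Char, ∀ i : Nat, ∀ fuel : Nat,
    ∀ cur : List Char, ∀ accs : List (List Char), l.length + 1 ≤ fuel →
    (∀ j < i, ¬ sep <+: l.drop j) → sep <+: l.drop i → ¬ sep <:+: l.drop (i + sep.length) →
    PySem.Chars.splitOn.go sep fuel l cur accs =
      accs.reverse ++ [cur.reverse ++ l.take i, l.drop (i + sep.length)]
  | [], i, fuel, cur, accs, hf, hmin, hi, hno => by
    exfalso
    rw [List.drop_nil] at hi
    cases sep with
    | nil => exact hs rfl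
    | cons x xs => exact absurd (List.prefix_nil.mp hi) (by simp)
  | a :: t, i, fuel, cur, accs, hf, hmin, hi, hno => by
    cases fuel with
    | zero => omega
    | succ fuel =>
      rw [go_split_cons]
      cases i with
      | zero =>
        have hpre : (sep.isPrefixOf (a::t)) = true := List.isPrefixOf_iff_prefix.mpr (by simpa using hi)
        rw [hpre, if_pos rfl]
        rw [splitOn_go_no_occ sep hs ((a::t).drop sep.length) fuel [] (cur.reverse :: accs) (by simpa using hno)]
        simp
      | succ i =>
        have hpre : (sep.isPrefixOf (a::t)) = false := by
          rw [Bool.eq_false_iff]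
          intro hx
          exact hmin 0 (Nat.succ_pos i) (by simpa using List.isPrefixOf_iff_prefix.mp hx)
        rw [hpre, if_neg (by simp)]
        have hi' : sep <+: t.drop i := hi
        have hno' : ¬ sep <:+: t.drop (i + sep.length) := by
          rw [show i + 1 + sep.length = (i + sep.length) + 1 from by omega] at hno
          exact hno
        rw [splitOn_go_one sep hs t i fuel (a::cur) accs (by simp at hf ⊢; omega)
          (fun j hj => hmin (j+1) (by omega)) hi' hno']
        rw [show i + 1 + sep.length = (i + sep.length) + 1 from by omega]
        simp [List.take_succ_cons]

lemma count_go_ge (sep : List Char) : ∀ fuel : Nat, ∀ l : List Char, ∀ acc : Nat,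
    acc ≤ PySem.Chars.count.go sep fuel l acc := by
  intro fuel
  induction fuel with
  | zero => intro l acc; rw [go_cnt_zero]
  | succ fuel ih =>
    intro l acc
    match l with
    | [] => rw [go_cnt_nil]
    | a :: t =>
      rw [go_cnt_cons]
      by_cases hp : sep.isPrefixOf (a::t)
      · rw [if_pos hp]
        have := ih ((a::t).drop sep.length) (acc+1); omega
      · rw [if_neg hp]
        exact ih t acc

lemma count_go_ge_one (sep : List Char) (hs : sep ≠ []) : ∀ l : List Char, ∀ fuel : Nat, ∀ acc : Nat,
    l.length ≤ fuel → sep <:+: l → acc + 1 ≤ PySem.Chars.count.go sep fuel l acc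
  | [], fuel, acc, _, hinf => by
    exfalso
    cases sep with
    | nil => exact hs rfl
    | cons x xs =>
      have := hinf.length_le; simp at this
  | a :: t, fuel, acc, hf, hinf => by
    cases fuel with
    | zero => simp at hf
    | succ fuel =>
      rw [go_cnt_cons]
      by_cases hp : sep.isPrefixOf (a::t)
      · rw [if_pos hp]
        have := count_go_ge sep fuel ((a::t).drop sep.length) (acc+1); omega
      · rw [if_neg hp]
        have ht : sep <:+: t := by
          rcases List.infix_cons_iff.mp hinf with h' | h'
          · exact absurd (List.isPrefixOf_iff_prefix.mpr h') hp
          · exact h'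
        exact count_go_ge_one sep hs t fuel acc (by simp at hf; omega) ht

lemma count_go_ge_two (sep : List Char) (hs : sep ≠ []) : ∀ l : List Char, ∀ i : Nat, ∀ fuel : Nat,
    ∀ acc : Nat, l.length ≤ fuel →
    (∀ j < i, ¬ sep <+: l.drop j) → sep <+: l.drop i → sep <:+: l.drop (i + sep.length) →
    acc + 2 ≤ PySem.Chars.count.go sep fuel l acc
  | [], i, fuel, acc, hf, hmin, hi, hno => by
    exfalso
    rw [List.drop_nil] at hi
    cases sep with
    | nil => exact hs rfl
    | cons x xs => exact absurd (List.prefix_nil.mp hi) (by simp)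
  | a :: t, i, fuel, acc, hf, hmin, hi, hno => by
    cases fuel with
    | zero => simp at hf
    | succ fuel =>
      rw [go_cnt_cons]
      cases i with
      | zero =>
        have hpre : (sep.isPrefixOf (a::t)) = true := List.isPrefixOf_iff_prefix.mpr (by simpa using hi)
        rw [hpre, if_pos rfl]
        apply count_go_ge_one sep hs ((a::t).drop sep.length) fuel (acc+1)
        · have h1 : 1 ≤ sep.length := by
            cases sep with
            | nil => exact absurd rfl hs
            | cons x xs => simp
          simp at hf ⊢; omega
        · simpa using hno
      | succ i =>
        have hpre : (sep.isPrefixOf (a::t)) = false := by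
          rw [Bool.eq_false_iff]
          intro hx
          exact hmin 0 (Nat.succ_pos i) (by simpa using List.isPrefixOf_iff_prefix.mp hx)
        rw [hpre, if_neg (by simp)]
        have hi' : sep <+: t.drop i := hi
        have hno' : sep <:+: t.drop (i + sep.length) := by
          rw [show i + 1 + sep.length = (i + sep.length) + 1 from by omega] at hno
          exact hno
        exact count_go_ge_two sep hs t i fuel acc (by simp at hf; omega)
          (fun j hj => hmin (j+1) (by omega)) hi' hno' 

lemma no_second_occ (u : List Char) (sep : List Char) (hs : sep ≠ []) (i : Nat)
    (hcnt : PySem.Chars.count u sep ≤ 1)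
    (hmin : ∀ j < i, ¬ sep <+: u.drop j) (hi : sep <+: u.drop i) :
    ¬ sep <:+: u.drop (i + sep.length) := by
  intro hno
  have h2 := count_go_ge_two sep hs u i u.length 0 (le_refl _) hmin hi hno
  have : PySem.Chars.count u sep = PySem.Chars.count.go sep u.length u 0 := by
    unfold PySem.Chars.count
    rw [if_neg (by simp [List.isEmpty_iff]; exact hs)]
  omega

-- the whole body-normalization pipelines agree
lemma core_eq (b : List Char) :
    (let body0 := stripACollapse b.length b
     let body1 := if PySem.Chars.isIn ['#'] body0 then (PySem.Chars.splitOn body0 ['#']).headD [] else body0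
     if PySem.Chars.isIn ['?'] body1 then (PySem.Chars.splitOn body1 ['?']).headD [] else body1)
    = stripBScan b [] := by
  simp only
  have hb0 : stripACollapse b.length b = pvSqz b := pvCollapse_eq b.length b (le_refl _)
  have cut : ∀ (x : List Char) (c : Char),
      (if PySem.Chars.isIn [c] x then (PySem.Chars.splitOn x [c]).headD [] else x)
        = x.takeWhile (· != c) := by
    intro x c
    by_cases hin : PySem.Chars.isIn [c] x
    · rw [if_pos hin, headD_splitOn_singleton]
    · rw [if_neg hin]
      have : c ∉ x := fun hm =>
        hin ((PySem.Chars.isIn_iff_infix _ _).mpr ((singleton_infix_iff c x).mpr hm))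
      exact (takeWhile_of_not_mem x c this).symm
  rw [hb0, cut, cut]
  have htw : ∀ x : List Char, (x.takeWhile (· != '#')).takeWhile (· != '?') = x.takeWhile pvP := by
    intro x
    induction x with
    | nil => simp
    | cons a t ih =>
      by_cases h1 : a = '#'
      · simp [List.takeWhile_cons, h1, pvP]
      · by_cases h2 : a = '?'
        · simp [List.takeWhile_cons, h1, h2, pvP]
        · simp [List.takeWhile_cons, h1, h2, pvP, ih]
  rw [htw, pvSqz_takeWhile b.length b (le_refl _)]
  rw [stripBScan_eq b []]
  simp
  exact ((pvSqA_spec b.length b (le_refl _)).1 none (by simp)).symm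

lemma toList_sep : ("://" : String).toList = [':', '/', '/'] := rfl

-- ===== VERDICT (by name: the statement is the Claim_ definition above) =====
theorem strip_url_py_spec : Claim_equal_strip_url_py := by
  intro url _ hpre
  unfold Spec_strip_url_py strip_url_py strip_url_py_alt
  simp only
  by_cases h : PySem.Chars.isIn [':','/','/'] url.toList
  · -- "://" occurs: find ≥ 0, split is [take i, drop (i+3)]
    have hinf : [':','/','/'] <:+: url.toList := (PySem.Chars.isIn_iff_infix _ _).mp h
    have hpos : 0 ≤ PySem.Chars.find url.toList [':','/','/'] :=
      (PySem.Chars.find_nonneg_iff _ _).mpr hinf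
    have hne : PySem.Chars.find url.toList [':','/','/'] ≠ -1 := by omega
    obtain ⟨hfst, hmin⟩ := PySem.Chars.find_spec (s := url.toList) (sub := [':','/','/']) hpos
    set i : Nat := (PySem.Chars.find url.toList [':','/','/']).toNat with hi
    have hcnt : PySem.Chars.count url.toList [':','/','/'] ≤ 1 := by
      have := hpre
      unfold Pre_strip_url_py at this
      rwa [PySem.Str.count, toList_sep] at this
    have hno2 : ¬ [':','/','/'] <:+: url.toList.drop (i + 3) :=
      no_second_occ url.toList [':','/','/'] (by simp) i hcnt
        (fun j hj => hmin j hj) hfst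
    have hsplit : PySem.Chars.splitOn url.toList [':','/','/'] =
        [url.toList.take i, url.toList.drop (i + 3)] := by
      unfold PySem.Chars.splitOn
      rw [splitOn_go_one [':','/','/'] (by simp) url.toList i (url.toList.length + 1) [] []
        (le_refl _) (fun j hj => hmin j hj) hfst (by simpa using hno2)]
      simp
    rw [if_pos h, hsplit, if_neg hne]
    simp only
    rw [core_eq]
  · have hfind : PySem.Chars.find url.toList [':','/','/'] = -1 :=
      (PySem.Chars.find_eq_neg_one_iff _ _).mpr
        (fun hx => h ((PySem.Chars.isIn_iff_infix _ _).mpr hx))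
    rw [if_neg h, if_pos hfind]
    simp only
    rw [core_eq]
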